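-- pv_equiv track=rewrite | github.com/jshimbo/adventofcode | 2021/15.py | extend_board
-- ===== SOURCE A (Python) =====
-- def extend_board(board, size):
--     board2 = []
--     # extend right size - 1 times
--     for _, row in enumerate(board):
--         new_row = []
--         for s in range(size):
--             for _, c in enumerate(row):
--                 x = c + s
--                 if x > 9:
--                     x = x % 10 + 1
--                 new_row.append(x)
--         board2.append(new_row)
--     # next, extend down size -1 times
--     new_board = []
--     for s in range(size):
--         for _, row in enumerate(board2):
--             new_row = []
--             for _, c in enumerate(row):
--                 x = c + s
--                 if x > 9:
--                     x = x % 10 + 1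
--                 new_row.append(x)
--             new_board.append(new_row)
--
--     return new_board
-- ===== SOURCE B (Python) =====
-- def extend_board(board, size):
--     # Single direct construction: no intermediate horizontally-tiled board.
--     result = []
--     for tile_r in range(size):
--         for row in board:
--             new_row = []
--             for tile_c in range(size):
--                 for c in row:
--                     x = c + tile_c
--                     if x > 9:
--                         x = x % 10 + 1
--                     x = x + tile_r
--                     if x > 9:
--                         x = x % 10 + 1
--                     new_row.append(x)
--             result.append(new_row)
--     return result
-- ===== Notes on version B (the rewrite author's own statement) =====
-- stated objective: simpler
-- what changed: Replaces A's two sequential tiling passes with its intermediate horizontally-tiled board2 by one direct construction that applies the two-stage wrap per cell and never materializes board2.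
import Mathlib
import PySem

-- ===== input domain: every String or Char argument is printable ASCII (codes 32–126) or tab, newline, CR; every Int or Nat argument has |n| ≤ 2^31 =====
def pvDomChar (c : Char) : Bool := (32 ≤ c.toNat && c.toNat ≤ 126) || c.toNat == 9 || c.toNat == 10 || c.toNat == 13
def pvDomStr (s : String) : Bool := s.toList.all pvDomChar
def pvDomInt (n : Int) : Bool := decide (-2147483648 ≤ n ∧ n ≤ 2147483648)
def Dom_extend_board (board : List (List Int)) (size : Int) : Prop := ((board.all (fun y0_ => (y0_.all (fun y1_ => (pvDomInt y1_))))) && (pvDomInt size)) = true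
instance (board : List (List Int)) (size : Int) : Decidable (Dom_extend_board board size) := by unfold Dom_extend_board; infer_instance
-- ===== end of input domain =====

-- B replaces A's two sequential tiling passes (intermediate board2) with one direct construction applying the two-stage wrap per cell; objective: simpler, same cost.
-- ===== PORT A =====
-- Python's wrap snippet 'if x > 9: x = x % 10 + 1' (divisor 10 > 0, so PySem.Int.mod is exact)
def pvWrap (x : Int) : Int := if x > 9 then PySem.Int.mod x 10 + 1 else x

def extend_board (board : List (List Int)) (size : Int) : List (List Int) :=
  let board2 := board.foldl (fun b2 row =>
      b2 ++ [(PySem.List.pyRange 0 size 1).foldl (fun nr s =>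
        row.foldl (fun nr c => nr ++ [pvWrap (c + s)]) nr) []]) []
  (PySem.List.pyRange 0 size 1).foldl (fun nb s =>
    board2.foldl (fun nb row =>
      nb ++ [row.foldl (fun nr c => nr ++ [pvWrap (c + s)]) []]) nb) []

-- ===== PORT B =====
def extend_board_alt (board : List (List Int)) (size : Int) : List (List Int) :=
  (PySem.List.pyRange 0 size 1).foldl (fun res tr =>
    board.foldl (fun res row =>
      res ++ [(PySem.List.pyRange 0 size 1).foldl (fun nr tc =>
        row.foldl (fun nr c => nr ++ [pvWrap (pvWrap (c + tc) + tr)]) nr) []]) res) []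

-- ===== PRECONDITION & SPEC =====
def Spec_extend_board (board : List (List Int)) (size : Int) (out : List (List Int)) : Prop := out = extend_board_alt board size
instance (board : List (List Int)) (size : Int) (out : List (List Int)) : Decidable (Spec_extend_board board size out) := by unfold Spec_extend_board; infer_instance

-- ===== CLAIM (what is proved, stated in full; the proofs are below) =====
def Claim_equal_extend_board : Prop := ∀ (board : List (List Int)) (size : Int), Dom_extend_board board size → Spec_extend_board board size (extend_board board size)

-- ===== LEMMAS AND PROOFS =====

-- ===== VERDICT (by name: the statement is the Claim_ definition above) =====
theorem extend_board_spec : Claim_equal_extend_board := by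
  intro board size _
  unfold Spec_extend_board extend_board extend_board_alt
  simp only [PySem.List.foldl_append_singleton_eq_map, PySem.List.foldl_append_eq_flatMap,
    List.nil_append]
  simp only [Function.comp_def, List.map_flatMap, List.map_map]
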